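-- pv_equiv track=rewrite | github.com/TunaSaygin/IncrementalLLM | dataset_utils.py | calculate_slot_differences
-- ===== SOURCE A (Python) =====
-- def calculate_slot_differences(gt_slots, pred_slots):
--     diff_count = 0
--     for slot in gt_slots:
--         if slot not in pred_slots or gt_slots[slot] != pred_slots[slot]:
--             diff_count += 1
--     for slot in pred_slots:
--         if slot not in gt_slots:
--             diff_count += 1
--     return diff_count
-- ===== SOURCE B (Python) =====
-- def calculate_slot_differences(gt_slots, pred_slots):
--     gt_keys = set(gt_slots)
--     pred_keys = set(pred_slots)
--     return len(gt_keys ^ pred_keys) + sum(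
--         1 for k in gt_keys & pred_keys if gt_slots[k] != pred_slots[k]
--     )
-- ===== Notes on version B (the rewrite author's own statement) =====
-- stated objective: simpler
-- what changed: Replaces the two membership-checked loops by set algebra: the symmetric difference of the key sets counts keys in exactly one dict, plus one value-comparison pass over only the shared keys.
import Mathlib
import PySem

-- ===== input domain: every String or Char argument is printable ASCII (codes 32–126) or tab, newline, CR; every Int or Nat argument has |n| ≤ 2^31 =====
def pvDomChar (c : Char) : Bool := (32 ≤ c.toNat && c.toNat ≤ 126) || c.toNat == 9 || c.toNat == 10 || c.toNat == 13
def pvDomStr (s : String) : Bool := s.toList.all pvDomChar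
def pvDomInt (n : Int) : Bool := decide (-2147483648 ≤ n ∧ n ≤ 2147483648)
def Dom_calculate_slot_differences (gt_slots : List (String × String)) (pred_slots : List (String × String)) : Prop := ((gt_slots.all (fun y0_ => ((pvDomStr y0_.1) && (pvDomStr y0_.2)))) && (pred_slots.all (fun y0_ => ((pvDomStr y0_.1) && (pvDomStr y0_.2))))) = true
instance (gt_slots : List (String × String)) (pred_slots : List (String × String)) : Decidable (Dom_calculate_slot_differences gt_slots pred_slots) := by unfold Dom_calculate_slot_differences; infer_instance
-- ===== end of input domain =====

-- B replaces A's two membership-checked loops by key-set algebra (symmetric difference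
-- + one value-comparison pass over the shared keys); objective: simpler.

-- ===== PORT A =====
def calculate_slot_differences (gt_slots : List (String × String)) (pred_slots : List (String × String)) : Int :=
  let dg : PySem.Dict String String := PySem.Dict.mk gt_slots
  let dp : PySem.Dict String String := PySem.Dict.mk pred_slots
  -- diff_count = 0; first loop: for slot in gt_slots
  let diff_count : Int := dg.keys.foldl (fun acc slot =>
      if (!dp.contains slot || (dg.get? slot != dp.get? slot)) then acc + 1 else acc) 0
  -- second loop: for slot in pred_slots
  dp.keys.foldl (fun acc slot =>
      if (!dg.contains slot) then acc + 1 else acc) diff_count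

-- ===== PORT B =====
def calculate_slot_differences_alt (gt_slots : List (String × String)) (pred_slots : List (String × String)) : Int :=
  let dg : PySem.Dict String String := PySem.Dict.mk gt_slots
  let dp : PySem.Dict String String := PySem.Dict.mk pred_slots
  let gt_keys : PySem.Set String := PySem.Set.ofList (gt_slots.map Prod.fst)
  let pred_keys : PySem.Set String := PySem.Set.ofList (pred_slots.map Prod.fst)
  -- len(gt_keys ^ pred_keys) + sum(1 for k in gt_keys & pred_keys if gt_slots[k] != pred_slots[k])
  PySem.Set.len (PySem.Set.symmDiff gt_keys pred_keys) +
    (PySem.Set.inter gt_keys pred_keys).foldl (fun acc k =>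
      if (dg.get? k != dp.get? k) then acc + 1 else acc) 0

-- ===== PRECONDITION & SPEC =====
-- Pre_ requires each association list to have pairwise-distinct keys: the arguments
-- model Python dicts, which cannot contain a duplicate key.
def Pre_calculate_slot_differences (gt_slots : List (String × String)) (pred_slots : List (String × String)) : Prop :=
  (gt_slots.map Prod.fst).Nodup ∧ (pred_slots.map Prod.fst).Nodup
instance (gt_slots : List (String × String)) (pred_slots : List (String × String)) : Decidable (Pre_calculate_slot_differences gt_slots pred_slots) := by unfold Pre_calculate_slot_differences; infer_instance

def pvWitness_calculate_slot_differences : (List (String × String)) × (List (String × String)) :=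
  ([("food", "pizza"), ("area", "north")], [("food", "pasta"), ("price", "cheap")])

def Spec_calculate_slot_differences (gt_slots : List (String × String)) (pred_slots : List (String × String)) (out : Int) : Prop := out = calculate_slot_differences_alt gt_slots pred_slots
instance (gt_slots : List (String × String)) (pred_slots : List (String × String)) (out : Int) : Decidable (Spec_calculate_slot_differences gt_slots pred_slots out) := by unfold Spec_calculate_slot_differences; infer_instance

-- ===== CLAIM (what is proved, stated in full; the proofs are below) =====
def Claim_equal_calculate_slot_differences : Prop := ∀ (gt_slots : List (String × String)) (pred_slots : List (String × String)), Dom_calculate_slot_differences gt_slots pred_slots → Pre_calculate_slot_differences gt_slots pred_slots → Spec_calculate_slot_differences gt_slots pred_slots (calculate_slot_differences gt_slots pred_slots)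

-- ===== LEMMAS AND PROOFS =====

-- Splitting a 0/1-count by a second Boolean condition.
theorem pv_countP_split {α : Type} (p r : α → Bool) (l : List α) :
    l.countP p = l.countP (fun x => p x && r x) + l.countP (fun x => p x && !r x) := by
  induction l with
  | nil => simp
  | cons a t ih =>
    by_cases h : p a = true <;> by_cases h2 : r a = true <;>
      simp [h, h2, ih] <;> omega

-- Dict membership test on (Dict.mk ps) agrees with List.contains on the key list.
theorem pv_dict_contains_eq (ps : List (String × String)) (k : String) :
    (PySem.Dict.mk ps).contains k = (ps.map Prod.fst).contains k := by
  by_cases hm : k ∈ ps.map Prod.fst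
  · rw [(PySem.Dict.contains_iff_mem_keys _ _).mpr (by rw [PySem.Dict.keys_mk]; exact hm)]
    simpa using hm
  · have h1 : (PySem.Dict.mk ps).contains k = false := by
      rw [← Bool.not_eq_true]
      exact fun hc => hm (by
        have := (PySem.Dict.contains_iff_mem_keys _ _).mp hc
        rwa [PySem.Dict.keys_mk] at this)
    have h2 : (ps.map Prod.fst).contains k = false := by
      rw [← Bool.not_eq_true]; simpa using hm
    rw [h1, h2]

theorem calc_spec_aux (gt_slots pred_slots : List (String × String))
    (hG : (gt_slots.map Prod.fst).Nodup) (hP : (pred_slots.map Prod.fst).Nodup) :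
    calculate_slot_differences gt_slots pred_slots
      = calculate_slot_differences_alt gt_slots pred_slots := by
  unfold calculate_slot_differences calculate_slot_differences_alt
  simp only [PySem.Dict.keys_mk, PySem.Set.ofList_eq_self_of_nodup _ hG,
    PySem.Set.ofList_eq_self_of_nodup _ hP, PySem.Set.symmDiff, PySem.Set.diff,
    PySem.Set.inter, PySem.Set.len, PySem.List.foldl_count_if, List.length_append,
    pv_dict_contains_eq, PySem.Set.contains_eq_listContains]
  set dg : PySem.Dict String String := PySem.Dict.mk gt_slots with hdg
  set dp : PySem.Dict String String := PySem.Dict.mk pred_slots with hdp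
  set K : List String := gt_slots.map Prod.fst with hK
  set P : List String := pred_slots.map Prod.fst with hP2
  -- A's second loop counts |P \ K|
  have h2 : P.countP (fun slot => !K.contains slot)
      = (P.filter (fun x => !K.contains x)).length := by
    rw [← List.countP_eq_length_filter]
  -- A's first loop splits into |K \ P| + the common-key value-difference count
  have h1 : K.countP (fun slot => !P.contains slot || (dg.get? slot != dp.get? slot))
      = (K.filter (fun x => !P.contains x)).length
        + (K.filter (fun x => P.contains x)).countP (fun k => dg.get? k != dp.get? k) := by
    have hsplit := pv_countP_split
      (fun slot => !P.contains slot || (dg.get? slot != dp.get? slot))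
      (fun slot => P.contains slot) K
    rw [← List.countP_eq_length_filter, List.countP_filter, hsplit]
    rw [Nat.add_comm]
    congr 1
    · -- common part: the first disjunct is false on shared keys
      refine List.countP_congr (fun k _ => ?_)
      by_cases hmem : k ∈ P <;> simp [hmem, Bool.and_comm]
    · -- exclusive part: the condition is true whenever the key is absent from P
      refine List.countP_congr (fun k _ => ?_)
      by_cases hmem : k ∈ P <;> simp [hmem]
  rw [h1, h2]
  push_cast
  ring

-- ===== VERDICT (by name: the statement is the Claim_ definition above) =====
theorem calculate_slot_differences_spec : Claim_equal_calculate_slot_differences := by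
  intro gt_slots pred_slots _ hpre
  exact calc_spec_aux gt_slots pred_slots hpre.1 hpre.2
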